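-- pv_equiv track=rewrite | github.com/yungommi/algorithm | baekjoon/2025/250219-imple/6359.py | func
-- ===== SOURCE A (Python) =====
-- def func(n):
--     room = [1]*(n+1)
--     room[0]=0
--     for i in range(2,n+1):
--         tmp = i
--         while tmp <= n:
--             if room[tmp]==0:
--                 room[tmp]=1
--             else:
--                 room[tmp]=0
--             tmp += i
--     return sum(room)
-- ===== SOURCE B (Python) =====
-- def func(n):
--     # number of open rooms = number of perfect squares in [1, n] = floor(sqrt(n))
--     r = 0
--     while (r + 1) * (r + 1) <= n:
--         r += 1
--     return r
-- ===== Notes on version B (the rewrite author's own statement) =====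
-- stated objective: faster
-- what changed: Replaced the O(n log n) toggle-sieve over an (n+1)-cell array by computing floor(sqrt(n)) with a simple incrementing loop, since a room stays open iff its number is a perfect square.
import Mathlib
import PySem

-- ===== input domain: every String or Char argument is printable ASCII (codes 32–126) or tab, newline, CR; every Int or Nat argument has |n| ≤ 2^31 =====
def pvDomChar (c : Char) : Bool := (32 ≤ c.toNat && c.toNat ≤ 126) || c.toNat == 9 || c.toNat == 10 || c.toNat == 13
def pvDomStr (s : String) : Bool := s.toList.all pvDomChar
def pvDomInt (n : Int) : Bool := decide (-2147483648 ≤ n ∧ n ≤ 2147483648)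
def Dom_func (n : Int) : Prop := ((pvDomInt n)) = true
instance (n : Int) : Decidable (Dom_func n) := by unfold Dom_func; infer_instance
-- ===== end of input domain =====

-- B replaces A's toggle-sieve over an (n+1)-cell array by a loop computing
-- floor(sqrt(n)) (a room stays open iff its number is a perfect square); objective: faster.


-- ===== PORT A =====
-- inner 'while tmp <= n' loop; fuel-guarded (Python terminates since i ≥ 2); the body
-- is A's toggle 'room[tmp] = 1 if room[tmp]==0 else 0' followed by 'tmp += i'.
def funcInner (n i : Int) : Nat → Int → List Int → List Int
  | 0, _, room => room
  | fuel+1, tmp, room =>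
    if tmp ≤ n then
      funcInner n i fuel (tmp + i)
        (PySem.List.pySetD room tmp (if PySem.List.pyGetD room tmp 0 = 0 then 1 else 0))
    else room

-- room = [1]*(n+1); room[0] = 0; for i in range(2, n+1): tmp = i; while ...; return sum(room)
def func (n : Int) : Int :=
  ((PySem.List.pyRange 2 (n+1) 1).foldl
    (fun r i => funcInner n i (n+1).toNat i r)
    (PySem.List.pySetD (List.replicate (n+1).toNat (1 : Int)) 0 0)).sum

-- ===== PORT B =====
-- r = 0; while (r+1)*(r+1) <= n: r += 1  (fuel-guarded; terminates since r is bounded)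
def funcAltGo (n : Int) : Nat → Int → Int
  | 0, r => r
  | fuel+1, r => if (r + 1) * (r + 1) ≤ n then funcAltGo n fuel (r + 1) else r

def func_alt (n : Int) : Int := funcAltGo n (n.toNat + 1) 0

-- ===== PRECONDITION & SPEC =====
-- For negative n, A's room list is empty and its first indexed assignment raises IndexError.
def Pre_func (n : Int) : Prop := 0 ≤ n
instance (n : Int) : Decidable (Pre_func n) := by unfold Pre_func; infer_instance
def pvWitness_func : Int := (6)

def Spec_func (n : Int) (out : Int) : Prop := out = func_alt n
instance (n : Int) (out : Int) : Decidable (Spec_func n out) := by unfold Spec_func; infer_instance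

-- ===== CLAIM (what is proved, stated in full; the proofs are below) =====
def Claim_equal_func : Prop := ∀ (n : Int), Dom_func n → Pre_func n → Spec_func n (func n)

-- ===== LEMMAS AND PROOFS =====

-- ---------- B side: funcAltGo computes Nat.sqrt ----------

theorem funcAltGo_eq (n : Int) (hn : 0 ≤ n) :
    ∀ (fuel : Nat) (r : Nat), r * r ≤ n.toNat → Nat.sqrt n.toNat < r + fuel →
      funcAltGo n fuel (r : Int) = (Nat.sqrt n.toNat : Int) := by
  intro fuel
  induction fuel with
  | zero =>
    intro r h1 h2
    have := Nat.le_sqrt.mpr h1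
    omega
  | succ fuel ih =>
    intro r h1 h2
    simp only [funcAltGo]
    by_cases h : ((r : Int) + 1) * ((r : Int) + 1) ≤ n
    · rw [if_pos h]
      have h' : (r + 1) * (r + 1) ≤ n.toNat := by
        have : (((r + 1) * (r + 1) : Nat) : Int) ≤ ((n.toNat : Int)) := by
          push_cast
          rw [Int.toNat_of_nonneg hn]
          linarith
        exact_mod_cast this
      have := ih (r + 1) h' (by omega)
      rw [show ((r : Int) + 1) = (((r + 1 : Nat) : Int)) by push_cast; ring]
      exact this
    · rw [if_neg h]
      have h' : n.toNat < (r + 1) * (r + 1) := by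
        by_contra hc
        rw [not_lt] at hc
        apply h
        have := Int.ofNat_le.mpr hc
        push_cast at this
        rw [Int.toNat_of_nonneg hn] at this
        linarith
      have hle : r ≤ Nat.sqrt n.toNat := Nat.le_sqrt.mpr h1
      have hlt : Nat.sqrt n.toNat < r + 1 := Nat.sqrt_lt.mpr h'
      omega

theorem func_alt_eq (n : Int) (hn : 0 ≤ n) : func_alt n = (Nat.sqrt n.toNat : Int) := by
  have h := funcAltGo_eq n hn (n.toNat + 1) 0 (by simp)
    (by have := Nat.sqrt_le_self n.toNat; omega)
  simpa [func_alt] using h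

-- ---------- A side: the sieve ----------

-- toggle as A performs it on a cell
def tgl (v : Int) : Int := if v = 0 then 1 else 0

-- tgl iterated c times
def tglIter : Nat → Int → Int
  | 0, v => v
  | c+1, v => tglIter c (tgl v)

-- how many times cell k is toggled by the loops over i ∈ range(2, n+1)
def cntk (n : Int) (k : Nat) : Nat :=
  (PySem.List.pyRange 2 (n+1) 1).countP
    (fun i => decide (i ≤ (k:Int) ∧ (k:Int) ≤ n ∧ i ∣ ((k:Int) - i)))

theorem tglIter_bits : ∀ c : Nat,
    tglIter c 1 = (if Even c then (1:Int) else 0) ∧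
      tglIter c 0 = (if Even c then (0:Int) else 1) := by
  intro c
  induction c with
  | zero => simp [tglIter]
  | succ c ih =>
    obtain ⟨ih1, ih0⟩ := ih
    constructor
    · show tglIter c (tgl 1) = _
      rw [show tgl 1 = 0 from by norm_num [tgl], ih0]
      by_cases h : Even c <;> simp [Nat.even_add_one, h]
    · show tglIter c (tgl 0) = _
      rw [show tgl 0 = 1 from by norm_num [tgl], ih1]
      by_cases h : Even c <;> simp [Nat.even_add_one, h]

theorem int_dvd_shift (i k : Int) : i ∣ k - i ↔ i ∣ k := by
  constructor <;> intro h
  · have h2 := dvd_add h (dvd_refl i)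
    have e : k - i + i = k := by ring
    rwa [e] at h2
  · have h2 := dvd_sub h (dvd_refl i)
    exact h2

theorem funcInner_length (n i : Int) : ∀ (fuel : Nat) (tmp : Int) (room : List Int),
    (funcInner n i fuel tmp room).length = room.length := by
  intro fuel
  induction fuel with
  | zero => intro tmp room; rfl
  | succ fuel ih =>
    intro tmp room
    simp only [funcInner]
    split
    · rw [ih, PySem.List.length_pySetD]
    · rfl

theorem funcInner_get (n i : Int) (hi : 2 ≤ i) :
    ∀ (fuel : Nat) (tmp : Int) (room : List Int), 0 ≤ tmp → n < (room.length : Int) →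
      n < tmp + (fuel : Int) * i → ∀ (k : Nat), k < room.length →
      PySem.List.pyGetD (funcInner n i fuel tmp room) (k : Int) 0 =
        if tmp ≤ (k:Int) ∧ (k:Int) ≤ n ∧ i ∣ ((k:Int) - tmp)
        then tgl (PySem.List.pyGetD room (k:Int) 0) else PySem.List.pyGetD room (k:Int) 0 := by
  intro fuel
  induction fuel with
  | zero =>
    intro tmp room _ _ hfuel k _
    simp only [funcInner]
    rw [if_neg]
    rintro ⟨h1, h2, -⟩
    push_cast at hfuel
    omega
  | succ fuel ih =>
    intro tmp room htmp0 hlen hfuel k hk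
    simp only [funcInner]
    by_cases htn : tmp ≤ n
    · rw [if_pos htn]
      set v := PySem.List.pyGetD room tmp 0 with hv
      set room' := PySem.List.pySetD room tmp (if v = 0 then 1 else 0) with hroom'
      have hlen' : room'.length = room.length := PySem.List.length_pySetD ..
      have hfuel' : n < (tmp + i) + (fuel : Int) * i := by
        push_cast at hfuel
        nlinarith [hfuel]
      have hrec := ih (tmp + i) room' (by omega) (by rw [hlen']; exact hlen) hfuel' k
        (by rw [hlen']; exact hk)
      rw [hrec]
      have htlt : tmp.toNat < room.length := by omega
      have hset : ∀ (m : Nat), PySem.List.pyGetD room' (m : Int) 0 =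
          if m = tmp.toNat then (if v = 0 then 1 else 0)
          else PySem.List.pyGetD room (m:Int) 0 := by
        intro m
        rw [hroom', show tmp = ((tmp.toNat : Nat) : Int) from (Int.toNat_of_nonneg htmp0).symm]
        exact PySem.List.pyGetD_pySetD_natCast room tmp.toNat m _ 0 htlt
      by_cases hkt : k = tmp.toNat
      · have hk_int : (k:Int) = tmp := by omega
        rw [hset k, if_pos hkt]
        rw [if_neg (by rintro ⟨h1, -, -⟩; omega)]
        have hcondT : tmp ≤ (k:Int) ∧ (k:Int) ≤ n ∧ i ∣ ((k:Int) - tmp) := by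
          refine ⟨by omega, by omega, ?_⟩
          rw [hk_int, sub_self]
          exact dvd_zero i
        rw [if_pos hcondT, hk_int, ← hv]
        simp [tgl]
      · have hkne : (k:Int) ≠ tmp := by omega
        rw [hset k, if_neg hkt]
        have hdvd : (i ∣ ((k:Int) - (tmp + i))) ↔ (i ∣ ((k:Int) - tmp)) := by
          have e : (k:Int) - (tmp + i) = ((k:Int) - tmp) - i := by ring
          rw [e, int_dvd_shift]
        have hcond : (tmp + i ≤ (k:Int) ∧ (k:Int) ≤ n ∧ i ∣ ((k:Int) - (tmp+i))) ↔
            (tmp ≤ (k:Int) ∧ (k:Int) ≤ n ∧ i ∣ ((k:Int) - tmp)) := by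
          constructor
          · rintro ⟨h1, h2, h3⟩
            exact ⟨by omega, h2, hdvd.mp h3⟩
          · rintro ⟨h1, h2, h3⟩
            have hpos : 0 < (k:Int) - tmp := by omega
            have := Int.le_of_dvd hpos h3
            exact ⟨by omega, h2, hdvd.mpr h3⟩
        simp only [hcond]
    · rw [if_neg htn]
      rw [if_neg]
      rintro ⟨h1, h2, -⟩
      omega

theorem fold_length (n : Int) (F : Nat) : ∀ (is : List Int) (room : List Int),
    (is.foldl (fun r i => funcInner n i F i r) room).length = room.length := by
  intro is
  induction is with
  | nil => intro room; rfl
  | cons i is ih =>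
    intro room
    rw [List.foldl_cons, ih, funcInner_length]

theorem fold_get (n : Int) (hn : 0 ≤ n) :
    ∀ (is : List Int) (room : List Int), (∀ i ∈ is, 2 ≤ i) → n < (room.length : Int) →
      ∀ (k : Nat), k < room.length →
      PySem.List.pyGetD (is.foldl (fun r i => funcInner n i (n+1).toNat i r) room) (k:Int) 0 =
        tglIter (is.countP
            (fun i => decide (i ≤ (k:Int) ∧ (k:Int) ≤ n ∧ i ∣ ((k:Int) - i))))
          (PySem.List.pyGetD room (k:Int) 0) := by
  intro is
  induction is with
  | nil =>
    intro room _ _ k _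
    simp [tglIter]
  | cons i is ih =>
    intro room hmem hlen k hk
    have hi : 2 ≤ i := hmem i (by simp)
    have hfuel : n < i + (((n+1).toNat : Nat) : Int) * i := by
      rw [Int.toNat_of_nonneg (by omega : (0:Int) ≤ n + 1)]
      nlinarith [mul_le_mul_of_nonneg_left hi (by omega : (0:Int) ≤ n + 1)]
    have hinner := funcInner_get n i hi (n+1).toNat i room (by omega) hlen hfuel k hk
    rw [List.foldl_cons]
    rw [ih (funcInner n i (n+1).toNat i room)
      (fun j hj => hmem j (by simp [hj]))
      (by rw [funcInner_length]; exact hlen) k (by rw [funcInner_length]; exact hk)]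
    rw [hinner, List.countP_cons]
    by_cases hc : i ≤ (k:Int) ∧ (k:Int) ≤ n ∧ i ∣ ((k:Int) - i)
    · rw [if_pos hc]
      simp only [hc]
      rfl
    · rw [if_neg hc]
      simp only [decide_eq_true_eq, hc, if_false]
      rw [Nat.add_zero]

theorem length_filter_range (q : Nat → Bool) : ∀ m : Nat,
    ((List.range m).filter q).length = Finset.card ((Finset.range m).filter (fun j => q j = true)) := by
  intro m
  induction m with
  | zero => simp
  | succ m ih =>
    rw [List.range_succ, List.filter_append, List.length_append, ih, Finset.range_add_one,
      Finset.filter_insert]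
    by_cases hq : q m
    · rw [if_pos (by simp [hq]), Finset.card_insert_of_notMem (by simp)]
      simp [hq]
    · rw [if_neg (by simp [hq])]
      simp [hq]

theorem cntk_eq (n : Int) (hn : 0 ≤ n) (k : Nat) (hk1 : 1 ≤ k) (hkn : (k:Int) ≤ n) :
    cntk n k = Finset.card (k.divisors.filter (fun d => 2 ≤ d)) := by
  unfold cntk
  rw [PySem.List.pyRange_one, List.countP_map, List.countP_eq_length_filter,
    length_filter_range]
  refine Finset.card_nbij' (fun j => j + 2) (fun d => d - 2) ?_ ?_ ?_ ?_
  · intro j hj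
    simp only [Finset.coe_filter, Set.mem_setOf_eq, Finset.mem_range, Function.comp_apply,
      decide_eq_true_eq] at hj
    obtain ⟨hjr, h1, h2, h3⟩ := hj
    have hdvdI : (2 + (j:Int)) ∣ (k:Int) := (int_dvd_shift _ _).mp h3
    have hdvdN : (j + 2) ∣ k := by
      have : (((j + 2 : Nat)) : Int) ∣ ((k : Nat) : Int) := by push_cast; convert hdvdI using 1; ring
      exact_mod_cast this
    simp only [Finset.coe_filter, Set.mem_setOf_eq, Nat.mem_divisors]
    exact ⟨⟨hdvdN, by omega⟩, by omega⟩
  · intro d hd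
    simp only [Finset.coe_filter, Set.mem_setOf_eq, Nat.mem_divisors] at hd
    obtain ⟨⟨hdvd, hk0⟩, h2d⟩ := hd
    have hdk : d ≤ k := Nat.le_of_dvd (by omega) hdvd
    simp only [Finset.coe_filter, Set.mem_setOf_eq, Finset.mem_range, Function.comp_apply,
      decide_eq_true_eq]
    have hde : (2 + ((d - 2 : Nat) : Int)) = (d : Int) := by omega
    refine ⟨by omega, ?_⟩
    rw [hde]
    refine ⟨by exact_mod_cast hdk, hkn, (int_dvd_shift _ _).mpr (by exact_mod_cast hdvd)⟩
  · intro j _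
    show j + 2 - 2 = j
    omega
  · intro d hd
    simp only [Finset.coe_filter, Set.mem_setOf_eq, Nat.mem_divisors] at hd
    show d - 2 + 2 = d
    omega

theorem card_filter_two (k : Nat) (hk : 1 ≤ k) :
    Finset.card (k.divisors.filter (fun d => 2 ≤ d)) + 1 = k.divisors.card := by
  have h := Finset.card_filter_add_card_filter_not (s := k.divisors)
    (p := fun d => 2 ≤ d)
  have hone : k.divisors.filter (fun d => ¬ 2 ≤ d) = {1} := by
    ext d
    simp only [Finset.mem_filter, Nat.mem_divisors, Finset.mem_singleton, not_le]
    constructor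
    · rintro ⟨⟨hdvd, hk0⟩, hlt⟩
      have : 0 < d := Nat.pos_of_dvd_of_pos hdvd (by omega)
      omega
    · rintro rfl
      exact ⟨⟨one_dvd k, by omega⟩, by omega⟩
  rw [hone] at h
  simpa using h

theorem odd_card_divisors (k : Nat) (hk : 1 ≤ k) :
    Odd k.divisors.card ↔ Nat.sqrt k * Nat.sqrt k = k := by
  have h1 := Finset.card_filter_add_card_filter_not (s := k.divisors)
    (p := fun d => d * d < k)
  have h2 := Finset.card_filter_add_card_filter_not
    (s := k.divisors.filter (fun d => ¬ d * d < k)) (p := fun d => d * d = k)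
  rw [Finset.filter_filter, Finset.filter_filter] at h2
  have e1 : (k.divisors.filter (fun d => ¬ d * d < k ∧ d * d = k)) =
      k.divisors.filter (fun d => d * d = k) := by
    apply Finset.filter_congr
    intro d _
    constructor
    · rintro ⟨-, h⟩; exact h
    · intro h; exact ⟨by omega, h⟩
  have e2 : (k.divisors.filter (fun d => ¬ d * d < k ∧ ¬ d * d = k)) =
      k.divisors.filter (fun d => k < d * d) := by
    apply Finset.filter_congr
    intro d _
    constructor
    · rintro ⟨ha, hb⟩; omega
    · intro h; omega
  rw [e1, e2] at h2
  have hLU : Finset.card (k.divisors.filter (fun d => d * d < k)) =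
      Finset.card (k.divisors.filter (fun d => k < d * d)) := by
    refine Finset.card_nbij' (fun d => k / d) (fun d => k / d) ?_ ?_ ?_ ?_
    · intro d hd
      simp only [Finset.coe_filter, Set.mem_setOf_eq, Nat.mem_divisors] at hd ⊢
      obtain ⟨⟨hdvd, hk0⟩, hlt⟩ := hd
      have hd0 : 0 < d := Nat.pos_of_dvd_of_pos hdvd (by omega)
      have he : d * (k / d) = k := Nat.mul_div_cancel' hdvd
      have hlt2 : d < k / d := by
        apply lt_of_mul_lt_mul_left (a := d) _ (Nat.zero_le d)
        omega
      refine ⟨⟨Nat.div_dvd_of_dvd hdvd, hk0⟩, ?_⟩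
      nlinarith [he, hlt2]
    · intro d hd
      simp only [Finset.coe_filter, Set.mem_setOf_eq, Nat.mem_divisors] at hd ⊢
      obtain ⟨⟨hdvd, hk0⟩, hgt⟩ := hd
      have hd0 : 0 < d := Nat.pos_of_dvd_of_pos hdvd (by omega)
      have he : d * (k / d) = k := Nat.mul_div_cancel' hdvd
      have hq0 : 0 < k / d := Nat.div_pos (Nat.le_of_dvd (by omega) hdvd) hd0
      have hlt2 : k / d < d := by
        apply lt_of_mul_lt_mul_left (a := d) _ (Nat.zero_le d)
        omega
      refine ⟨⟨Nat.div_dvd_of_dvd hdvd, hk0⟩, ?_⟩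
      nlinarith [he, hlt2, hq0]
    · intro d hd
      simp only [Finset.coe_filter, Set.mem_setOf_eq, Nat.mem_divisors] at hd
      exact Nat.div_div_self hd.1.1 hd.1.2
    · intro d hd
      simp only [Finset.coe_filter, Set.mem_setOf_eq, Nat.mem_divisors] at hd
      exact Nat.div_div_self hd.1.1 hd.1.2
  have hM : Finset.card (k.divisors.filter (fun d => d * d = k)) =
      if Nat.sqrt k * Nat.sqrt k = k then 1 else 0 := by
    by_cases hsq : Nat.sqrt k * Nat.sqrt k = k
    · rw [if_pos hsq]
      have : k.divisors.filter (fun d => d * d = k) = {Nat.sqrt k} := by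
        ext d
        simp only [Finset.mem_filter, Nat.mem_divisors, Finset.mem_singleton]
        constructor
        · rintro ⟨-, hdd⟩
          exact Nat.mul_self_inj.mp (by rw [hdd, hsq])
        · rintro rfl
          exact ⟨⟨Dvd.intro _ hsq, by omega⟩, hsq⟩
      rw [this, Finset.card_singleton]
    · rw [if_neg hsq]
      rw [Finset.card_eq_zero, Finset.filter_eq_empty_iff]
      intro d hd
      intro hdd
      apply hsq
      have : Nat.sqrt k = d := by rw [← hdd, ← pow_two d, Nat.sqrt_eq']
      rw [this, hdd]
  by_cases hsq : Nat.sqrt k * Nat.sqrt k = k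
  · simp only [hsq, if_true] at hM
    constructor
    · intro _; exact hsq
    · intro _
      refine ⟨Finset.card {d ∈ k.divisors | d * d < k}, ?_⟩
      omega
  · simp only [hsq, if_false] at hM
    constructor
    · intro hodd
      exfalso
      obtain ⟨c, hc⟩ := hodd
      omega
    · intro h; exact absurd h hsq

theorem cntk_zero (n : Int) : cntk n 0 = 0 := by
  unfold cntk
  rw [List.countP_eq_zero]
  intro i hi
  have := PySem.List.mem_pyRange_one.mp hi
  simp only [decide_eq_true_eq, Nat.cast_zero]
  rintro ⟨h1, -, -⟩
  omega

theorem sum_map_range (g : Nat → Int) : ∀ m : Nat,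
    ((List.range m).map g).sum = ∑ k ∈ Finset.range m, g k := by
  intro m
  induction m with
  | zero => simp
  | succ m ih =>
    rw [List.range_succ, List.map_append, List.sum_append, Finset.sum_range_succ, ih]
    simp

theorem card_squares (m : Nat) :
    Finset.card ((Finset.range (m+1)).filter (fun k => ¬ k = 0 ∧ Nat.sqrt k * Nat.sqrt k = k)) =
      Nat.sqrt m := by
  have h : Finset.card (Finset.Icc 1 (Nat.sqrt m)) =
      Finset.card ((Finset.range (m+1)).filter (fun k => ¬ k = 0 ∧ Nat.sqrt k * Nat.sqrt k = k)) := by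
    refine Finset.card_nbij (fun j => j * j) ?_ ?_ ?_
    · intro j hj
      simp only [Finset.coe_Icc, Set.mem_Icc] at hj
      simp only [Finset.coe_filter, Set.mem_setOf_eq, Finset.mem_range]
      have hle : j * j ≤ m := Nat.le_sqrt.mp hj.2
      have : Nat.sqrt (j * j) = j := by rw [← pow_two j]; exact Nat.sqrt_eq' j
      refine ⟨by omega, by nlinarith [hj.1], by rw [this]⟩
    · intro a ha b hb hab
      exact Nat.mul_self_inj.mp hab
    · intro x hx
      simp only [Finset.coe_filter, Set.mem_setOf_eq, Finset.mem_range] at hx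
      obtain ⟨hxm, hx0, hxs⟩ := hx
      refine ⟨Nat.sqrt x, ?_, hxs⟩
      simp only [Finset.coe_Icc, Set.mem_Icc]
      constructor
      · have hne : Nat.sqrt x ≠ 0 := by
          intro h0
          rw [h0] at hxs
          omega
        omega
      · exact Nat.le_sqrt.mpr (by omega)
  rw [← h, Nat.card_Icc]
  omega

theorem func_eq_sqrt (n : Int) (hn : 0 ≤ n) : func n = (Nat.sqrt n.toNat : Int) := by
  unfold func
  set R0 : List Int := PySem.List.pySetD (List.replicate (n+1).toNat (1 : Int)) 0 0 with hR0
  set L : List Int := (PySem.List.pyRange 2 (n+1) 1).foldl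
    (fun r i => funcInner n i (n+1).toNat i r) R0 with hL
  have hlen0 : R0.length = n.toNat + 1 := by
    rw [hR0, PySem.List.length_pySetD, List.length_replicate]
    omega
  have hlenL : L.length = n.toNat + 1 := by
    rw [hL, fold_length, hlen0]
  have hR0get : ∀ k : Nat, k < n.toNat + 1 →
      PySem.List.pyGetD R0 (k:Int) 0 = if k = 0 then 0 else 1 := by
    intro k hk
    have h00 : PySem.List.pyGetD R0 (k:Int) 0 =
        if k = 0 then (0:Int)
        else PySem.List.pyGetD (List.replicate (n+1).toNat (1:Int)) (k:Int) 0 := by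
      have h := PySem.List.pyGetD_pySetD_natCast (List.replicate (n+1).toNat (1:Int)) 0 k 0 0
        (by rw [List.length_replicate]; omega)
      simpa [hR0] using h
    rw [h00]
    by_cases hk0 : k = 0
    · simp [hk0]
    · rw [if_neg hk0, if_neg hk0]
      rw [PySem.List.pyGetD_of_nonneg _ _ (by omega : (0:Int) ≤ (k:Int))]
      have hkrep : k < (n+1).toNat := by omega
      simp [List.getD, hkrep]
  have hLget : ∀ k : Nat, k < n.toNat + 1 →
      PySem.List.pyGetD L (k:Int) 0 = tglIter (cntk n k) (if k = 0 then 0 else 1) := by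
    intro k hk
    rw [hL, fold_get n hn _ _ (fun i hi => (PySem.List.mem_pyRange_one.mp hi).1)
      (by rw [hlen0]; push_cast; omega) k (by rw [hlen0]; exact hk)]
    rw [hR0get k hk]
    rfl
  have hmap : L = (List.range (n.toNat + 1)).map
      (fun k => tglIter (cntk n k) (if k = 0 then 0 else 1)) := by
    apply List.ext_getElem (by simp [hlenL])
    intro k h1 h2
    have hget := hLget k (by omega)
    rw [PySem.List.pyGetD_eq_getElem _ _ (by omega) (by omega)] at hget
    simp only [Int.toNat_natCast] at hget
    rw [List.getElem_map, List.getElem_range]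
    exact hget
  rw [hmap, sum_map_range]
  have hterm : ∀ k ∈ Finset.range (n.toNat + 1),
      tglIter (cntk n k) (if k = 0 then 0 else 1) =
        (if ¬ k = 0 ∧ Nat.sqrt k * Nat.sqrt k = k then (1:Int) else 0) := by
    intro k hk
    rw [Finset.mem_range] at hk
    by_cases hk0 : k = 0
    · subst hk0
      rw [cntk_zero]
      simp [tglIter]
    · rw [if_neg hk0, (tglIter_bits (cntk n k)).1]
      have hk1 : 1 ≤ k := by omega
      have hkn : (k:Int) ≤ n := by omega
      have hcnt := cntk_eq n hn k hk1 hkn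
      have hpar : Even (cntk n k) ↔ Nat.sqrt k * Nat.sqrt k = k := by
        rw [hcnt]
        rw [← odd_card_divisors k hk1]
        have hd := card_filter_two k hk1
        constructor
        · intro he
          obtain ⟨c, hc⟩ := he
          exact ⟨c, by omega⟩
        · intro ho
          obtain ⟨c, hc⟩ := ho
          exact ⟨c, by omega⟩
      by_cases hsq : Nat.sqrt k * Nat.sqrt k = k
      · rw [if_pos (hpar.mpr hsq), if_pos ⟨hk0, hsq⟩]
      · rw [if_neg (fun he => hsq (hpar.mp he)), if_neg (fun hc => hsq hc.2)]
  rw [Finset.sum_congr rfl hterm]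
  rw [Finset.sum_boole]
  rw [card_squares]

-- ===== VERDICT (by name: the statement is the Claim_ definition above) =====
theorem func_spec : Claim_equal_func := by
  intro n _ hn
  unfold Spec_func
  rw [func_eq_sqrt n hn, func_alt_eq n hn]
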